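-- pv_equiv track=rewrite | github.com/eliottcassidy2000/math | 04-computation/dihedral_paley.py | connection_set_type
-- ===== SOURCE A (Python) =====
-- def is_prime(n):
--     if n < 2:
--         return False
--     for p in [2, 3, 5, 7, 11, 13]:
--         if n == p:
--             return True
--         if n % p == 0:
--             return False
--     d = 17
--     while d * d <= n:
--         if n % d == 0:
--             return False
--         d += 2
--     return True
--
-- def connection_set_type(n, S):
--     """Classify the connection set S."""
--     S_set = set(S)
--     # Check if cyclic interval: S = {a, a+1, ..., a+(n-1)/2-1} mod n
--     k = (n - 1) // 2
--     for start in range(1, n):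
--         interval = frozenset((start + i) % n for i in range(k))
--         # Exclude 0 from interval
--         if 0 in interval:
--             continue
--         if frozenset(S) == interval:
--             return f"interval[{start}..{(start+k-1)%n}]"
--
--     # Check if QR
--     if is_prime(n):
--         qr = set()
--         for x in range(1, n):
--             qr.add((x * x) % n)
--         if S_set == qr:
--             return "QR (Paley)"
--         if S_set == set(range(1, n)) - qr:
--             return "NQR (Paley complement)"
--
--     return "other"
-- ===== SOURCE B (Python) =====
-- def is_prime(n):
--     if n < 2:
--         return False
--     for p in [2, 3, 5, 7, 11, 13]:
--         if n == p:
--             return True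
--         if n % p == 0:
--             return False
--     d = 17
--     while d * d <= n:
--         if n % d == 0:
--             return False
--         d += 2
--     return True
--
-- def connection_set_type(n, S):
--     """Classify the connection set S (sort-based: no scan over all starts)."""
--     d = sorted(set(S))
--     k = (n - 1) // 2
--     # interval: the distinct elements are one contiguous zero-free run of length k
--     if n >= 2 and len(d) == k and (k == 0 or (d[0] >= 1 and d[-1] <= n - 1 and d[-1] - d[0] == k - 1)):
--         start = d[0] if k > 0 else 1
--         return f"interval[{start}..{(start + k - 1) % n}]"
--     if is_prime(n):
--         qr_set = {x * x % n for x in range(1, n)}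
--         if d == sorted(qr_set):
--             return "QR (Paley)"
--         if d == [x for x in range(1, n) if x not in qr_set]:
--             return "NQR (Paley complement)"
--     return "other"
-- ===== Notes on version B (the rewrite author's own statement) =====
-- stated objective: faster
-- what changed: The O(n*k) scan over all n-1 candidate interval starts (building a k-element set each time) is replaced by sorting the distinct elements once and checking that they form a single contiguous zero-free run, and the Paley comparisons are done on the sorted list / a filtered range instead of building and comparing extra sets.
import Mathlib
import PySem

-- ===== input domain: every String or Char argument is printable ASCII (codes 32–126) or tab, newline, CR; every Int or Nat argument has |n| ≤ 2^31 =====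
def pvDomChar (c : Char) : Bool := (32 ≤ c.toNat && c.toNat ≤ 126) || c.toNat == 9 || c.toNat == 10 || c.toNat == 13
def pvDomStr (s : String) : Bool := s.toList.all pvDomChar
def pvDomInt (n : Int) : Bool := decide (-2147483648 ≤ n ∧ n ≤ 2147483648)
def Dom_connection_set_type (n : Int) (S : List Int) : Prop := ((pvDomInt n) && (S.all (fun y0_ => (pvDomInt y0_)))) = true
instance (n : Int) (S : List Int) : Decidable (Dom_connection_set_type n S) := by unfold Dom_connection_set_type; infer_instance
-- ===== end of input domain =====

-- B replaces A's scan over all n-1 candidate interval starts by a single sort-and-contiguity check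
-- (and compares the Paley sets through the sorted list / a filtered range); measured faster (asymptotic).

-- ===== PORT A =====
-- shared helper is_prime (the module helper; both Pythons call it)
def pvSmallPrimes (n : Int) : List Int → Option Bool
  | [] => none
  | p :: ps =>
    if n == p then some true
    else if PySem.Int.mod n p == 0 then some false
    else pvSmallPrimes n ps

def pvPrimeLoop (n d : Int) : Bool :=
  if h : d * d ≤ n then
    if PySem.Int.mod n d == 0 then false else pvPrimeLoop n (d + 2)
  else true
termination_by (n + 2 - d).toNat
decreasing_by
  have hd : d ≤ n := by
    by_cases h0 : d ≤ 0
    · nlinarith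
    · nlinarith
  omega

def pvIsPrime (n : Int) : Bool :=
  if n < 2 then false
  else
    match pvSmallPrimes n [2, 3, 5, 7, 11, 13] with
    | some b => b
    | none => pvPrimeLoop n 17

-- qr = {x*x % n for x in range(1, n)} (built by the same add-loop in both Pythons)
def pvQRSet (n : Int) : PySem.Set Int :=
  (PySem.List.pyRange 1 n 1).foldl (fun s x => PySem.Set.add s (PySem.Int.mod (x * x) n)) PySem.Set.empty

-- interval = frozenset((start + i) % n for i in range(k))
def pvInterval (n k start : Int) : PySem.Set Int :=
  PySem.Set.ofList ((PySem.List.pyRange 0 k 1).map (fun i => PySem.Int.mod (start + i) n))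

-- f"interval[{start}..{(start+k-1)%n}]"
def pvIntervalStr (n k start : Int) : String :=
  "interval[" ++ PySem.Int.toStr start ++ ".." ++ PySem.Int.toStr (PySem.Int.mod (start + k - 1) n) ++ "]"

-- the 'for start in range(1, n)' search with its two exits
def pvFindInterval (n k : Int) (S : List Int) : List Int → Option String
  | [] => none
  | start :: rest =>
    if PySem.Set.contains (pvInterval n k start) 0 then pvFindInterval n k S rest
    else if PySem.Set.equal (PySem.Set.ofList S) (pvInterval n k start) then some (pvIntervalStr n k start)
    else pvFindInterval n k S rest

def connection_set_type (n : Int) (S : List Int) : String :=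
  let S_set := PySem.Set.ofList S
  let k := PySem.Int.floordiv (n - 1) 2
  match pvFindInterval n k S (PySem.List.pyRange 1 n 1) with
  | some r => r
  | none =>
    if pvIsPrime n then
      let qr := pvQRSet n
      if PySem.Set.equal S_set qr then "QR (Paley)"
      else if PySem.Set.equal S_set (PySem.Set.diff (PySem.Set.ofList (PySem.List.pyRange 1 n 1)) qr) then "NQR (Paley complement)"
      else "other"
    else "other"

-- ===== PORT B =====
def connection_set_type_alt (n : Int) (S : List Int) : String :=
  let d := PySem.List.sorted (PySem.Set.ofList S) (fun x => x) false
  let k := PySem.Int.floordiv (n - 1) 2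
  if 2 ≤ n ∧ PySem.List.len d = k ∧
      (k = 0 ∨ (1 ≤ PySem.List.pyGetD d 0 0 ∧ PySem.List.pyGetD d (-1) 0 ≤ n - 1 ∧
        PySem.List.pyGetD d (-1) 0 - PySem.List.pyGetD d 0 0 = k - 1)) then
    let start := if 0 < k then PySem.List.pyGetD d 0 0 else 1
    "interval[" ++ PySem.Int.toStr start ++ ".." ++ PySem.Int.toStr (PySem.Int.mod (start + k - 1) n) ++ "]"
  else if pvIsPrime n then
    let qr := pvQRSet n
    if d = PySem.List.sorted qr (fun x => x) false then "QR (Paley)"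
    else if d = (PySem.List.pyRange 1 n 1).filter (fun x => !(PySem.Set.contains qr x)) then "NQR (Paley complement)"
    else "other"
  else "other"

-- ===== PRECONDITION & SPEC =====
def Spec_connection_set_type (n : Int) (S : List Int) (out : String) : Prop := out = connection_set_type_alt n S
instance (n : Int) (S : List Int) (out : String) : Decidable (Spec_connection_set_type n S out) := by unfold Spec_connection_set_type; infer_instance

-- ===== CLAIM (what is proved, stated in full; the proofs are below) =====
def Claim_equal_connection_set_type : Prop := ∀ (n : Int) (S : List Int), Dom_connection_set_type n S → Spec_connection_set_type n S (connection_set_type n S)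

-- ===== LEMMAS AND PROOFS =====

-- two strictly increasing integer lists with the same members are equal
theorem pvEqOfPairwiseLt (l₁ l₂ : List Int) (h₁ : l₁.Pairwise (· < ·)) (h₂ : l₂.Pairwise (· < ·))
    (hm : ∀ x, x ∈ l₁ ↔ x ∈ l₂) : l₁ = l₂ := by
  have n₁ : l₁.Nodup := h₁.imp ne_of_lt
  have n₂ : l₂.Nodup := h₂.imp ne_of_lt
  exact ((List.perm_ext_iff_of_nodup n₁ n₂).mpr hm).eq_of_pairwise
    (fun a b _ _ hab hba => absurd hba (lt_asymm hab)) h₁ h₂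

-- sorted of a Nodup list is strictly increasing
theorem pvSortedNodupPairwiseLt (l : List Int) (h : l.Nodup) :
    (PySem.List.sorted l (fun x => x) false).Pairwise (· < ·) := by
  have hle : (PySem.List.sorted l (fun x => x) false).Pairwise (fun a b => a ≤ b) :=
    PySem.List.sorted_pairwise l (fun x => x)
  have hnd : (PySem.List.sorted l (fun x => x) false).Nodup :=
    ((PySem.List.sorted_perm l (fun x => x) false).nodup_iff).mpr h
  exact (List.pairwise_and_iff.mpr ⟨hle, hnd⟩).imp (fun hab => lt_of_le_of_ne hab.1 hab.2)

-- Set.equal s t ↔ their sorted lists are equal (s, t Nodup)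
theorem pvEqualIffSorted (s t : List Int) (hs : s.Nodup) (ht : t.Nodup) :
    PySem.Set.equal s t = true ↔
      PySem.List.sorted s (fun x => x) false = PySem.List.sorted t (fun x => x) false := by
  constructor
  · intro h
    apply pvEqOfPairwiseLt _ _ (pvSortedNodupPairwiseLt s hs) (pvSortedNodupPairwiseLt t ht)
    intro x
    rw [PySem.List.mem_sorted, PySem.List.mem_sorted]
    exact (PySem.Set.equal_iff s t).mp h x
  · intro h
    rw [PySem.Set.equal_iff]
    intro x
    rw [← PySem.List.mem_sorted (key := fun x => x) (rev := false) (xs := s), h,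
      PySem.List.mem_sorted]

theorem pvQRSet_eq (n : Int) :
    pvQRSet n = PySem.Set.ofList ((PySem.List.pyRange 1 n 1).map (fun x => PySem.Int.mod (x * x) n)) := by
  unfold pvQRSet
  rw [← PySem.Set.update_map_eq_foldl_add]
  exact PySem.Set.update_empty _

-- no-wrap interval list is the plain range
theorem pvIntervalNoWrap (n k start : Int) (hs : 1 ≤ start) (hk : 0 ≤ k) (hsk : start + k ≤ n) :
    (PySem.List.pyRange 0 k 1).map (fun i => PySem.Int.mod (start + i) n)
      = PySem.List.pyRange start (start + k) 1 := by
  apply List.ext_getElem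
  · simp [PySem.List.length_pyRange_one]
  · intro j h1 h2
    have hj : (j : Int) < k := by
      have := h1
      simp [PySem.List.length_pyRange_one] at this
      omega
    simp only [List.getElem_map, PySem.List.getElem_pyRange_one]
    rw [PySem.Int.mod_eq_emod_of_pos (by omega)]
    rw [Int.emod_eq_of_lt (by omega) (by omega)]
    omega

-- wrapping interval contains 0
theorem pvIntervalWrap (n k start : Int) (hs : 1 ≤ start) (hsn : start < n) (hw : n < start + k) :
    (0 : Int) ∈ (PySem.List.pyRange 0 k 1).map (fun i => PySem.Int.mod (start + i) n) := by
  refine List.mem_map.mpr ⟨n - start, ?_, ?_⟩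
  · rw [PySem.List.mem_pyRange_one]; omega
  · rw [show start + (n - start) = n by ring, PySem.Int.mod_eq_emod_of_pos (by omega)]
    exact Int.emod_self

-- strictly increasing list: last ≥ head + length - 1
theorem pvGap (l : List Int) (h : l ≠ []) (hp : l.Pairwise (· < ·)) :
    l.head h + l.length - 1 ≤ l.getLast h := by
  induction l with
  | nil => exact absurd rfl h
  | cons x t ih =>
    cases t with
    | nil => simp
    | cons y u =>
      have hxy : x < y := List.rel_of_pairwise_cons hp (by simp)
      have ht := ih (by simp) (hp.tail)
      rw [List.getLast_cons (by simp)]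
      simp only [List.head_cons, List.length_cons] at *
      omega

-- strictly increasing, last - head = length - 1 → the list is the full range
theorem pvContig (l : List Int) (h : l ≠ []) (hp : l.Pairwise (· < ·))
    (he : l.getLast h - l.head h = (l.length : Int) - 1) :
    l = PySem.List.pyRange (l.head h) (l.head h + l.length) 1 := by
  induction l with
  | nil => exact absurd rfl h
  | cons x t ih =>
    cases t with
    | nil =>
      simp only [List.head_cons, List.length_cons, List.length_nil]
      rw [show (x : Int) + ((0 : Nat) + 1 : Nat) = x + 1 by push_cast; omega]
      exact (PySem.List.pyRange_one_singleton x).symm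
    | cons y u =>
      have hxy : x < y := List.rel_of_pairwise_cons hp (by simp)
      have hgap := pvGap (y :: u) (by simp) hp.tail
      have hlast : (x :: y :: u).getLast h = (y :: u).getLast (by simp) :=
        List.getLast_cons (by simp)
      rw [hlast] at he
      simp only [List.head_cons, List.length_cons] at he hgap ⊢
      have hy : y = x + 1 := by omega
      have he' : (y :: u).getLast (by simp) - (y :: u).head (by simp) = ((y :: u).length : Int) - 1 := by
        simp only [List.head_cons, List.length_cons] at *
        omega
      have hrec := ih (by simp) hp.tail he'
      rw [List.head_cons, List.length_cons] at hrec
      rw [PySem.List.pyRange_one_cons (by push_cast; omega)]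
      rw [hrec, hy]
      congr 2
      push_cast
      omega

-- search: all fail → none
theorem pvFindNone (n k : Int) (S : List Int) (l : List Int)
    (hf : ∀ s ∈ l, PySem.Set.contains (pvInterval n k s) 0 = false →
      PySem.Set.equal (PySem.Set.ofList S) (pvInterval n k s) = false) :
    pvFindInterval n k S l = none := by
  induction l with
  | nil => rfl
  | cons s rest ih =>
    simp only [pvFindInterval]
    have hs := hf s (by simp)
    split_ifs with h1 h2
    · exact ih (fun t ht => hf t (by simp [ht]))
    · rw [hs (by simpa using h1)] at h2; cases h2
    · exact ih (fun t ht => hf t (by simp [ht]))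

-- search: prefix fails, s succeeds → some at s
theorem pvFindSome (n k : Int) (S : List Int) (l₁ l₂ : List Int) (s : Int)
    (hf : ∀ t ∈ l₁, PySem.Set.contains (pvInterval n k t) 0 = false →
      PySem.Set.equal (PySem.Set.ofList S) (pvInterval n k t) = false)
    (h0 : PySem.Set.contains (pvInterval n k s) 0 = false)
    (he : PySem.Set.equal (PySem.Set.ofList S) (pvInterval n k s) = true) :
    pvFindInterval n k S (l₁ ++ s :: l₂) = some (pvIntervalStr n k s) := by
  induction l₁ with
  | nil =>
    rw [List.nil_append]
    simp only [pvFindInterval]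
    rw [h0, he]
    simp
  | cons t rest ih =>
    rw [List.cons_append]
    simp only [pvFindInterval]
    have hft := hf t (by simp)
    split_ifs with h1 h2
    · exact ih (fun t' ht' => hf t' (by simp [ht']))
    · rw [hft (by simpa using h1)] at h2; cases h2
    · exact ih (fun t' ht' => hf t' (by simp [ht']))

-- success characterization at a start in [1, n)
theorem pvSuccessIff (n k start : Int) (S : List Int) (hk : 0 ≤ k)
    (hs : 1 ≤ start) (hsn : start < n) :
    (PySem.Set.contains (pvInterval n k start) 0 = false ∧
      PySem.Set.equal (PySem.Set.ofList S) (pvInterval n k start) = true) ↔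
    (start + k ≤ n ∧
      PySem.List.sorted (PySem.Set.ofList S) (fun x => x) false = PySem.List.pyRange start (start + k) 1) := by
  by_cases hw : start + k ≤ n
  · have hI : pvInterval n k start = PySem.List.pyRange start (start + k) 1 := by
      unfold pvInterval
      rw [pvIntervalNoWrap n k start hs hk hw]
      exact PySem.Set.ofList_eq_self_of_nodup _ (PySem.List.nodup_pyRange_one start (start + k))
    constructor
    · rintro ⟨h0, he⟩
      refine ⟨hw, ?_⟩
      apply pvEqOfPairwiseLt
      · exact pvSortedNodupPairwiseLt _ (PySem.Set.nodup_ofList S)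
      · exact PySem.List.pairwise_lt_pyRange_one start (start + k)
      · intro x
        rw [PySem.List.mem_sorted]
        have hx := (PySem.Set.equal_iff _ _).mp he x
        rw [hI] at hx
        exact hx
    · rintro ⟨_, hd⟩
      have hmem : ∀ x : Int, x ∈ PySem.Set.ofList S ↔ x ∈ PySem.List.pyRange start (start + k) 1 := by
        intro x
        rw [← PySem.List.mem_sorted (key := fun x => x) (rev := false), hd]
      constructor
      · rw [hI]
        have hnm : (0 : Int) ∉ PySem.List.pyRange start (start + k) 1 := by
          rw [PySem.List.mem_pyRange_one]; omega
        apply Bool.eq_false_iff.mpr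
        intro hc
        exact hnm ((PySem.Set.contains_iff _ _).mp hc)
      · rw [PySem.Set.equal_iff, hI]
        exact hmem
  · have h0 : (0 : Int) ∈ pvInterval n k start := by
      unfold pvInterval
      rw [PySem.Set.mem_ofList]
      exact pvIntervalWrap n k start hs hsn (by omega)
    constructor
    · rintro ⟨hc, _⟩
      rw [(PySem.Set.contains_iff _ _).mpr h0] at hc
      cases hc
    · rintro ⟨h1, _⟩
      omega

-- helper: d[0] of a nonempty list
theorem pvGetD0 (l : List Int) (h : l ≠ []) : PySem.List.pyGetD l 0 0 = l.head h := by
  cases l with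
  | nil => exact absurd rfl h
  | cons x t => rw [PySem.List.pyGetD_zero_cons, List.head_cons]

-- the QR comparison: set equality ↔ equality of the sorted lists
theorem pvQREq (n : Int) (S : List Int) :
    PySem.Set.equal (PySem.Set.ofList S) (pvQRSet n) = true ↔
      PySem.List.sorted (PySem.Set.ofList S) (fun x => x) false
        = PySem.List.sorted (pvQRSet n) (fun x => x) false := by
  apply pvEqualIffSorted _ _ (PySem.Set.nodup_ofList S)
  rw [pvQRSet_eq]
  exact PySem.Set.nodup_ofList _

-- the NQR comparison: set equality with the difference ↔ equality with the filtered range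
theorem pvNQREq (n : Int) (S : List Int) :
    PySem.Set.equal (PySem.Set.ofList S)
        (PySem.Set.diff (PySem.Set.ofList (PySem.List.pyRange 1 n 1)) (pvQRSet n)) = true ↔
      PySem.List.sorted (PySem.Set.ofList S) (fun x => x) false
        = (PySem.List.pyRange 1 n 1).filter (fun x => !(PySem.Set.contains (pvQRSet n) x)) := by
  have hmemL : ∀ x : Int,
      (x ∈ (PySem.List.pyRange 1 n 1).filter (fun x => !(PySem.Set.contains (pvQRSet n) x))) ↔
        x ∈ PySem.Set.diff (PySem.Set.ofList (PySem.List.pyRange 1 n 1)) (pvQRSet n) := by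
    intro x
    rw [List.mem_filter, PySem.Set.mem_diff, PySem.Set.mem_ofList]
    constructor
    · rintro ⟨h1, h2⟩
      refine ⟨h1, fun hm => ?_⟩
      rw [(PySem.Set.contains_iff _ _).mpr hm] at h2
      cases h2
    · rintro ⟨h1, h2⟩
      refine ⟨h1, ?_⟩
      have hcf : PySem.Set.contains (pvQRSet n) x = false :=
        Bool.eq_false_iff.mpr fun hc => h2 ((PySem.Set.contains_iff _ _).mp hc)
      rw [hcf]; rfl
  have hqr : (pvQRSet n).Nodup := by rw [pvQRSet_eq]; exact PySem.Set.nodup_ofList _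
  constructor
  · intro h
    apply pvEqOfPairwiseLt
    · exact pvSortedNodupPairwiseLt _ (PySem.Set.nodup_ofList S)
    · exact (PySem.List.pairwise_lt_pyRange_one 1 n).filter _
    · intro x
      rw [PySem.List.mem_sorted, hmemL x]
      exact (PySem.Set.equal_iff _ _).mp h x
  · intro h
    rw [PySem.Set.equal_iff]
    intro x
    rw [← PySem.List.mem_sorted (key := fun x => x) (rev := false) (xs := PySem.Set.ofList S), h,
      hmemL x]

theorem connection_set_type_eq (n : Int) (S : List Int) :
    connection_set_type n S = connection_set_type_alt n S := by
  unfold connection_set_type connection_set_type_alt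
  dsimp only
  set d := PySem.List.sorted (PySem.Set.ofList S) (fun x => x) false with hd
  set k := PySem.Int.floordiv (n - 1) 2 with hkdef
  have hdp : d.Pairwise (· < ·) := pvSortedNodupPairwiseLt _ (PySem.Set.nodup_ofList S)
  have hQR :
      (if pvIsPrime n = true then
        if (PySem.Set.ofList S).equal (pvQRSet n) = true then "QR (Paley)"
        else if (PySem.Set.ofList S).equal ((PySem.Set.ofList (PySem.List.pyRange 1 n 1)).diff (pvQRSet n)) = true then "NQR (Paley complement)"
        else "other"
      else "other")
      = (if pvIsPrime n = true then
        if d = PySem.List.sorted (pvQRSet n) (fun x => x) false then "QR (Paley)"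
        else if d = (PySem.List.pyRange 1 n 1).filter (fun x => !(PySem.Set.contains (pvQRSet n) x)) then "NQR (Paley complement)"
        else "other"
      else "other") := by
    by_cases hp : pvIsPrime n = true
    · rw [if_pos hp, if_pos hp]
      by_cases h1 : d = PySem.List.sorted (pvQRSet n) (fun x => x) false
      · rw [if_pos ((pvQREq n S).mpr (hd ▸ h1)), if_pos h1]
      · rw [if_neg (fun hc => h1 (by rw [hd]; exact (pvQREq n S).mp hc)), if_neg h1]
        by_cases h2 : d = (PySem.List.pyRange 1 n 1).filter (fun x => !(PySem.Set.contains (pvQRSet n) x))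
        · rw [if_pos ((pvNQREq n S).mpr (hd ▸ h2)), if_pos h2]
        · rw [if_neg (fun hc => h2 (by rw [hd]; exact (pvNQREq n S).mp hc)), if_neg h2]
    · rw [if_neg hp, if_neg hp]
  by_cases hn : 2 ≤ n
  · have hkd : k = (n - 1) / 2 := by rw [hkdef]; exact PySem.Int.floordiv_eq_ediv_of_pos (by omega)
    have hk0 : 0 ≤ k := by rw [hkd]; omega
    have hk2 : 2 * k ≤ n - 1 ∧ n - 1 ≤ 2 * k + 1 := by rw [hkd]; omega
    by_cases hc : (2 ≤ n ∧ PySem.List.len d = k ∧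
        (k = 0 ∨ (1 ≤ PySem.List.pyGetD d 0 0 ∧ PySem.List.pyGetD d (-1) 0 ≤ n - 1 ∧
          PySem.List.pyGetD d (-1) 0 - PySem.List.pyGetD d 0 0 = k - 1)))
    · obtain ⟨-, hlen, hdisj⟩ := hc
      have hlen' : (d.length : Int) = k := by rw [← PySem.List.len_eq]; exact hlen
      by_cases hk00 : k = 0
      · have hdnil : d = [] := by
          have : d.length = 0 := by omega
          exact List.eq_nil_of_length_eq_zero this
        have hsucc := (pvSuccessIff n k 1 S hk0 (by omega) (by omega)).mpr
          ⟨by omega, by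
            rw [← hd, hdnil]
            rw [PySem.List.pyRange_one_eq_nil (by omega)]⟩
        have hfind : pvFindInterval n k S (PySem.List.pyRange 1 n 1) = some (pvIntervalStr n k 1) := by
          rw [PySem.List.pyRange_one_cons (show (1:Int) < n by omega)]
          have := pvFindSome n k S [] (PySem.List.pyRange (1+1) n 1) 1 (by simp) hsucc.1 hsucc.2
          rw [List.nil_append] at this
          exact this
        rw [hfind]
        have hcpos : (2 ≤ n ∧ PySem.List.len d = k ∧
        (k = 0 ∨ (1 ≤ PySem.List.pyGetD d 0 0 ∧ PySem.List.pyGetD d (-1) 0 ≤ n - 1 ∧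
          PySem.List.pyGetD d (-1) 0 - PySem.List.pyGetD d 0 0 = k - 1))) := ⟨hn, hlen, hdisj⟩
        rw [if_pos hcpos]
        rw [if_neg (show ¬(0:Int) < k by omega)]
        rfl
      · obtain ⟨hd0ge, hdlle, hdiff⟩ := hdisj.resolve_left hk00
        have hk1 : 1 ≤ k := by omega
        have hne : d ≠ [] := by
          intro h0
          rw [h0] at hlen'
          simp at hlen'
          omega
        have hd0 : PySem.List.pyGetD d 0 0 = d.head hne := pvGetD0 d hne
        have hdl : PySem.List.pyGetD d (-1) 0 = d.getLast hne := PySem.List.pyGetD_neg_one d 0 hne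
        rw [hd0] at hd0ge
        rw [hdl] at hdlle
        rw [hd0, hdl] at hdiff
        have hcont := pvContig d hne hdp (by omega)
        rw [hlen'] at hcont
        have hbound : d.head hne + k ≤ n := by omega
        have hd0n : d.head hne < n := by omega
        have hsucc := (pvSuccessIff n k (d.head hne) S hk0 hd0ge hd0n).mpr
          ⟨hbound, by rw [← hd]; exact hcont⟩
        have hfail : ∀ t ∈ PySem.List.pyRange 1 (d.head hne) 1,
            PySem.Set.contains (pvInterval n k t) 0 = false →
            PySem.Set.equal (PySem.Set.ofList S) (pvInterval n k t) = false := by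
          intro t ht hcz
          have htb := (PySem.List.mem_pyRange_one).mp ht
          apply Bool.eq_false_iff.mpr
          intro heq
          have hsucc2 := (pvSuccessIff n k t S hk0 (by omega) (by omega)).mp ⟨hcz, heq⟩
          have heq2 : PySem.List.pyRange (d.head hne) (d.head hne + k) 1 = PySem.List.pyRange t (t + k) 1 := by
            rw [← hcont, hd]
            exact hsucc2.2
          rw [PySem.List.pyRange_one_cons (show d.head hne < d.head hne + k by omega),
            PySem.List.pyRange_one_cons (show t < t + k by omega)] at heq2
          have := (List.cons.injEq _ _ _ _).mp heq2
          omega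
        have hfind : pvFindInterval n k S (PySem.List.pyRange 1 n 1) = some (pvIntervalStr n k (d.head hne)) := by
          rw [PySem.List.pyRange_one_append 1 (d.head hne) n (by omega) (by omega),
            PySem.List.pyRange_one_cons (show d.head hne < n by omega)]
          exact pvFindSome n k S _ _ (d.head hne) hfail hsucc.1 hsucc.2
        rw [hfind]
        have hcpos : (2 ≤ n ∧ PySem.List.len d = k ∧
        (k = 0 ∨ (1 ≤ PySem.List.pyGetD d 0 0 ∧ PySem.List.pyGetD d (-1) 0 ≤ n - 1 ∧
          PySem.List.pyGetD d (-1) 0 - PySem.List.pyGetD d 0 0 = k - 1))) :=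
          ⟨hn, hlen, Or.inr ⟨by rw [hd0]; exact hd0ge, by rw [hdl]; exact hdlle, by rw [hd0, hdl]; omega⟩⟩
        rw [if_pos hcpos]
        rw [if_pos (show (0:Int) < k by omega)]
        rw [hd0]
        rfl
    · have hfail : ∀ s ∈ PySem.List.pyRange 1 n 1,
          PySem.Set.contains (pvInterval n k s) 0 = false →
          PySem.Set.equal (PySem.Set.ofList S) (pvInterval n k s) = false := by
        intro t ht hcz
        have htb := (PySem.List.mem_pyRange_one).mp ht
        apply Bool.eq_false_iff.mpr
        intro heq
        have hsucc := (pvSuccessIff n k t S hk0 htb.1 htb.2).mp ⟨hcz, heq⟩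
        obtain ⟨hbnd, hdeq⟩ := hsucc
        have hdeq' : d = PySem.List.pyRange t (t + k) 1 := by rw [hd]; exact hdeq
        apply hc
        refine ⟨hn, ?_, ?_⟩
        · rw [PySem.List.len_eq, hdeq', PySem.List.length_pyRange_one]
          omega
        · by_cases hk00 : k = 0
          · exact Or.inl hk00
          · refine Or.inr ?_
            have hsplit2 : PySem.List.pyRange t (t + k) 1 = PySem.List.pyRange t (t + k - 1) 1 ++ [t + k - 1] := by
              have h := PySem.List.pyRange_one_succ_right (a := t) (b := t + k - 1) (by omega)
              rw [show t + k - 1 + 1 = t + k by ring] at h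
              exact h
            have h0v : PySem.List.pyGetD d 0 0 = t := by
              rw [hdeq', PySem.List.pyRange_one_cons (show t < t + k by omega), PySem.List.pyGetD_zero_cons]
            have hlv : PySem.List.pyGetD d (-1) 0 = t + k - 1 := by
              rw [hdeq', hsplit2]
              exact PySem.List.pyGetD_neg_one_append_singleton _ _ 0
            rw [h0v, hlv]
            refine ⟨by omega, by omega, by omega⟩
      have hfind : pvFindInterval n k S (PySem.List.pyRange 1 n 1) = none := pvFindNone n k S _ hfail
      rw [hfind]
      rw [if_neg hc]
      exact hQR
  · have hfind : pvFindInterval n k S (PySem.List.pyRange 1 n 1) = none := by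
      rw [PySem.List.pyRange_one_eq_nil (by omega)]
      rfl
    rw [hfind]
    have hcneg : ¬ (2 ≤ n ∧ PySem.List.len d = k ∧
        (k = 0 ∨ (1 ≤ PySem.List.pyGetD d 0 0 ∧ PySem.List.pyGetD d (-1) 0 ≤ n - 1 ∧
          PySem.List.pyGetD d (-1) 0 - PySem.List.pyGetD d 0 0 = k - 1))) := fun hcc => hn hcc.1
    rw [if_neg hcneg]
    exact hQR

-- ===== VERDICT (by name: the statement is the Claim_ definition above) =====
theorem connection_set_type_spec : Claim_equal_connection_set_type := by
  intro n S _
  unfold Spec_connection_set_type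
  exact connection_set_type_eq n S
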